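-- pv_equiv track=rewrite | github.com/Seungkyu-Han/BOJ | 백준/Gold/28325. 호숫가의 개미굴/호숫가의 개미굴.py | solve
-- ===== SOURCE A (Python) =====
-- import math
--
-- def solve(n, c):
--     total = sum(c)
--
--     if total == 0:
--         return n // 2
--
--     start_index = 0
--
--     for i in range(n):
--         if c[i] > 0:
--             start_index = i
--             break
--
--     result = 0
--     cur_length = 0
--
--     for i in range(start_index + 1, n):
--         if c[i] == 0:
--             cur_length += 1
--         else:
--             result += c[i]
--             result += math.ceil(cur_length / 2)
--             cur_length = 0
--
--     for i in range(start_index + 1):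
--         if c[i] == 0:
--             cur_length += 1
--         else:
--             result += c[i]
--             result += math.ceil(cur_length / 2)
--             cur_length = 0
--
--     return result
-- ===== SOURCE B (Python) =====
-- def solve(n, c):
--     total = sum(c)
--     if total == 0:
--         return n // 2
--     positions = [i for i in range(n) if c[i] != 0]
--     result = sum(c[i] for i in positions)
--     for k in range(len(positions)):
--         gap = (positions[k] - positions[k - 1] - 1) % n
--         result += (gap + 1) // 2
--     return result
-- ===== Notes on version B (the rewrite author's own statement) =====
-- stated objective: simpler
-- what changed: Replaces the start-index search plus two wrap-around index scans with a cur_length accumulator by building the list of nonzero positions once and adding ceil(gap/2) for the circular zero-gap before each position, computed as (p - prev - 1) % n.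
-- outside the precondition, e.g. on solve(-1, [2]): A returns 2, B returns 0; on solve(0, [-1, 1, -1]): A returns -1, B returns 0; on solve(3, [0, -1, 0]): A returns -1, B returns 0
import Mathlib
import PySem

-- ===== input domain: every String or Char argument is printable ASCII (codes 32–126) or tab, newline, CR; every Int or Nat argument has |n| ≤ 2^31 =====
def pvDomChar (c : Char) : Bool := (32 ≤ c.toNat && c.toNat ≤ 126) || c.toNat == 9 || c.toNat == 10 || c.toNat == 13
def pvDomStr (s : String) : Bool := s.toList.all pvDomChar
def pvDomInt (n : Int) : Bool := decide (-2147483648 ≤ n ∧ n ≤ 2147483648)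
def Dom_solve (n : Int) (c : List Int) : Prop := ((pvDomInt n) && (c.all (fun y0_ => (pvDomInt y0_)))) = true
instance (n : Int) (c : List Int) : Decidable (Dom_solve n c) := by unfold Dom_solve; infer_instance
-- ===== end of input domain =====

-- B replaces A's start-index search and two wrap-around scans by one pass over the list of
-- nonzero positions, adding ceil(gap/2) for the circular zero-gap before each position.

-- ===== PORT A =====
-- math.ceil(x / 2) for an int x: exact integer ceiling division (A only applies it to
-- cur_length, a nonnegative count ≤ n ≤ 2^31, where the float division is exact).
def pyCeilHalf (x : Int) : Int := -(PySem.Int.floordiv (-x) 2)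

-- 'for i in range(n): if c[i] > 0: start_index = i; break' with start_index initialised to 0
def findStart (c : List Int) : List Int → Int
  | [] => 0
  | i :: t => if PySem.List.pyGetD c i 0 > 0 then i else findStart c t

def solve (n : Int) (c : List Int) : Int :=
  let total := c.sum
  if total = 0 then PySem.Int.floordiv n 2
  else
    let start_index := findStart c (PySem.List.pyRange 0 n 1)
    let st1 := (PySem.List.pyRange (start_index + 1) n 1).foldl
      (fun (st : Int × Int) i =>
        if PySem.List.pyGetD c i 0 = 0 then (st.1, st.2 + 1)
        else (st.1 + PySem.List.pyGetD c i 0 + pyCeilHalf st.2, 0)) (0, 0)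
    let st2 := (PySem.List.pyRange 0 (start_index + 1) 1).foldl
      (fun (st : Int × Int) i =>
        if PySem.List.pyGetD c i 0 = 0 then (st.1, st.2 + 1)
        else (st.1 + PySem.List.pyGetD c i 0 + pyCeilHalf st.2, 0)) st1
    st2.1

-- ===== PORT B =====
def solve_alt (n : Int) (c : List Int) : Int :=
  let total := c.sum
  if total = 0 then PySem.Int.floordiv n 2
  else
    let positions := (PySem.List.pyRange 0 n 1).filter (fun i => PySem.List.pyGetD c i 0 != 0)
    let result := (positions.map (fun i => PySem.List.pyGetD c i 0)).sum
    if positions = [] then result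
    else
      (positions.foldl
        (fun (st : Int × Int) p =>
          (st.1 + PySem.Int.floordiv (PySem.Int.mod (p - st.2 - 1) n + 1) 2, p))
        (result, PySem.List.pyGetD positions (-1) 0)).1

-- ===== PRECONDITION & SPEC =====
-- Pre_ excludes inputs outside the puzzle's domain (there n is the number of lake cells,
-- 1 <= n = len(c), counts nonnegative): (a) n > len(c) with nonzero total, where A raises
-- IndexError; (b) n <= 0 with nonzero total and c[0] != 0, where A's second loop still reads
-- c[0] and returns it although the cell range is empty, while B returns 0; (c) first n cells
-- all <= 0 with a nonzero entry, cell 0 empty and nonzero total, where A anchors its scan at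
-- index 0 and silently drops the wrap-around zero-run as leftover cur_length, while B counts
-- every circular gap once.
def Pre_solve (n : Int) (c : List Int) : Prop :=
  (c.sum = 0 ∨ (n ≤ c.length ∧ (1 ≤ n ∨ c.getD 0 0 = 0)))
  ∧ ¬ (c.sum ≠ 0 ∧ (∀ x ∈ c.take n.toNat, x ≤ 0) ∧ (∃ x ∈ c.take n.toNat, x ≠ 0)
        ∧ c.getD 0 0 = 0)
instance (n : Int) (c : List Int) : Decidable (Pre_solve n c) := by unfold Pre_solve; infer_instance
def pvWitness_solve : Int × List Int := (3, [1, 0, 2])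

def Spec_solve (n : Int) (c : List Int) (out : Int) : Prop := out = solve_alt n c
instance (n : Int) (c : List Int) (out : Int) : Decidable (Spec_solve n c out) := by unfold Spec_solve; infer_instance

-- ===== CLAIM (what is proved, stated in full; the proofs are below) =====
def Claim_equal_solve : Prop := ∀ (n : Int) (c : List Int), Dom_solve n c → Pre_solve n c → Spec_solve n c (solve n c)

-- ===== LEMMAS AND PROOFS =====

-- ceiling-half written as a floor
def ch (x : Int) : Int := (x + 1) / 2

theorem pyCeilHalf_eq (x : Int) : pyCeilHalf x = ch x := by
  unfold pyCeilHalf ch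
  rw [PySem.Int.floordiv_eq_ediv_of_pos (by norm_num)]
  omega

-- additivity of the (result, cur_length) scan of A
def lin : List Int → Int → Int
  | [], _ => 0
  | x :: t, cur => if x = 0 then lin t (cur + 1) else x + ch cur + lin t 0

def tz : List Int → Int → Int
  | [], cur => cur
  | x :: t, cur => if x = 0 then tz t (cur + 1) else tz t 0

-- positions of the nonzero entries, starting at absolute index s
def posList : List Int → Int → List Int
  | [], _ => []
  | x :: t, s => if x = 0 then posList t (s + 1) else s :: posList t (s + 1)

-- sum of ceil-half circular gaps, previous position as state
def Gn (n : Int) : Int → List Int → Int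
  | _, [] => 0
  | prev, q :: t => ch ((q - prev - 1) % n) + Gn n q t

-- same with plain (non-modular) gaps
def Gp : Int → List Int → Int
  | _, [] => 0
  | prev, q :: t => ch (q - prev - 1) + Gp q t

theorem foldA_eq (r : List Int) : ∀ (res cur : Int),
    r.foldl (fun (st : Int × Int) x =>
      if x = 0 then (st.1, st.2 + 1) else (st.1 + x + pyCeilHalf st.2, 0)) (res, cur)
      = (res + lin r cur, tz r cur) := by
  
  induction r with
  | nil => intro res cur; simp [lin, tz]
  | cons x t ih =>
    intro res cur
    by_cases hx : x = 0
    · simp [List.foldl_cons, hx, lin, tz, ih]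
    · simp only [List.foldl_cons, if_neg hx, lin, tz]
      rw [ih]
      refine Prod.ext ?_ rfl
      show res + x + pyCeilHalf cur + lin t 0 = res + (x + ch cur + lin t 0)
      rw [pyCeilHalf_eq]; ring

theorem lin_core (r : List Int) : ∀ (b s cur : Int), b ≠ 0 → 0 ≤ cur →
    lin (r ++ [b]) cur = r.sum + b + Gp (s - cur - 1) (posList r s ++ [s + r.length]) := by
  
  induction r with
  | nil =>
    intro b s cur hb hc
    have h1 : s - (s - cur - 1) - 1 = cur := by ring
    simp [lin, if_neg hb, posList, Gp, h1]
  | cons x t ih =>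
    intro b s cur hb hc
    by_cases hx : x = 0
    · subst hx
      simp only [List.cons_append, lin, if_pos rfl, posList]
      rw [ih b (s + 1) (cur + 1) hb (by omega)]
      have h1 : s + 1 - (cur + 1) - 1 = s - cur - 1 := by ring
      have h2 : (s + 1 : Int) + (t.length : Int) = s + (((0 : Int) :: t).length : Int) := by
        simp only [List.length_cons, Nat.cast_add, Nat.cast_one]; ring
      rw [h1, h2]
      simp
    · simp only [List.cons_append, lin, if_neg hx, posList]
      rw [ih b (s + 1) 0 hb le_rfl]
      have h1 : (s + 1 : Int) + (t.length : Int) = s + ((x :: t).length : Int) := by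
        simp only [List.length_cons, Nat.cast_add, Nat.cast_one]; ring
      rw [h1]
      have h2 : s - (s - cur - 1) - 1 = cur := by ring
      simp [Gp, h2]
      ring

theorem lin_zero (r : List Int) : ∀ cur, (∀ x ∈ r, x = 0) → lin r cur = 0 := by
  
  induction r with
  | nil => intro cur _; rfl
  | cons x t ih =>
    intro cur h
    have hx : x = 0 := h x (by simp)
    simp [lin, hx]
    exact ih _ (fun y hy => h y (by simp [hy]))

theorem Gn_eq_Gp (n : Int) (hn : 0 < n) :
    ∀ (P : List Int) (prev : Int), List.Pairwise (· < ·) (prev :: P) →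
      (∀ q ∈ P, q ≤ prev + n) → Gn n prev P = Gp prev P := by
  
  intro P
  induction P with
  | nil => intro prev _ _; rfl
  | cons q t ih =>
    intro prev hpw hbd
    rw [List.pairwise_cons] at hpw
    have hq : prev < q := hpw.1 q (by simp)
    have hqn : q ≤ prev + n := hbd q (by simp)
    have hmod : (q - prev - 1) % n = q - prev - 1 :=
      Int.emod_eq_of_lt (by omega) (by omega)
    have hpw2 : List.Pairwise (· < ·) (q :: t) := hpw.2
    simp only [Gn, Gp, hmod]
    rw [ih q hpw2]
    intro r hr
    have h1 : q < r := (List.pairwise_cons.mp hpw2).1 r hr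
    have h2 : r ≤ prev + n := hbd r (by simp [hr])
    omega

theorem Gn_wrap (n : Int) (hn : 0 < n) (P : List Int)
    (hp : List.Pairwise (· < ·) P) (hb : ∀ q ∈ P, 0 ≤ q ∧ q < n) :
    Gn n (n - 1) P = Gp (-1) P := by
  
  cases P with
  | nil => rfl
  | cons q t =>
    have hq : 0 ≤ q ∧ q < n := hb q (by simp)
    have h1 : (q - (n - 1) - 1) % n = q := by
      rw [show q - (n - 1) - 1 = q - n by ring, Int.sub_emod_right]
      exact Int.emod_eq_of_lt hq.1 hq.2
    have h2 : q - (-1) - 1 = q := by ring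
    simp only [Gn, Gp, h1, h2]
    congr 1
    refine Gn_eq_Gp n hn t q hp ?_
    intro r hr
    have := (hb r (by simp [hr])).2
    omega

theorem Gn_append (n : Int) (X : List Int) : ∀ (prev : Int) (Y : List Int),
    Gn n prev (X ++ Y) = Gn n prev X + Gn n (X.getLastD prev) Y := by
  
  induction X with
  | nil => intro prev Y; simp [Gn]
  | cons q t ih =>
    intro prev Y
    simp only [List.cons_append, Gn, List.getLastD_cons]
    rw [ih q]
    ring

theorem Gn_shift (n s : Int) (X : List Int) : ∀ (prev : Int),
    Gn n (prev + s) (X.map (· + s)) = Gn n prev X := by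
  
  induction X with
  | nil => intro prev; rfl
  | cons q t ih =>
    intro prev
    simp only [List.map_cons, Gn]
    have h1 : q + s - (prev + s) - 1 = q - prev - 1 := by ring
    rw [h1, ih q]

theorem Gn_prev_add (n : Int) (X : List Int) (prev : Int) :
    Gn n (prev + n) X = Gn n prev X := by
  
  cases X with
  | nil => rfl
  | cons q t =>
    simp only [Gn]
    rw [show q - (prev + n) - 1 = (q - prev - 1) - n by ring, Int.sub_emod_right]

theorem posList_append (x : List Int) : ∀ (y : List Int) (s : Int),
    posList (x ++ y) s = posList x s ++ posList y (s + x.length) := by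
  induction x with
  | nil => intro y s; simp [posList]
  | cons a t ih =>
    intro y s
    have hl : s + 1 + (t.length : Int) = s + ((t.length : Int) + 1) := by ring
    by_cases ha : a = 0
    · simp only [List.cons_append, posList, if_pos ha, List.length_cons, Nat.cast_add,
        Nat.cast_one]
      rw [ih y (s + 1), hl]
    · simp only [List.cons_append, posList, if_neg ha, List.length_cons, Nat.cast_add,
        Nat.cast_one]
      rw [ih y (s + 1), hl]

theorem posList_map (d : List Int) : ∀ (s : Int), posList d s = (posList d 0).map (· + s) := by
  induction d with
  | nil => intro s; rfl
  | cons a t ih =>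
    intro s
    by_cases ha : a = 0
    · simp only [posList, if_pos ha, zero_add]
      rw [ih (s + 1), ih 1, List.map_map]
      apply List.map_congr_left
      intro p _
      simp only [Function.comp_apply]
      ring
    · simp only [posList, if_neg ha, zero_add]
      rw [ih (s + 1), ih 1]
      simp only [List.map_cons, List.map_map, zero_add]
      congr 1
      apply List.map_congr_left
      intro p _
      simp only [Function.comp_apply]
      ring

theorem mem_posList (d : List Int) : ∀ (s q : Int), q ∈ posList d s → s ≤ q ∧ q < s + d.length := by
  induction d with
  | nil => intro s q h; simp [posList] at h
  | cons a t ih =>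
    intro s q h
    have hl : (((a :: t).length : Nat) : Int) = (t.length : Int) + 1 := by
      simp only [List.length_cons, Nat.cast_add, Nat.cast_one]
    by_cases ha : a = 0
    · rw [posList, if_pos ha] at h
      have := ih (s + 1) q h
      omega
    · rw [posList, if_neg ha] at h
      rcases List.mem_cons.mp h with h1 | h1
      · subst h1; omega
      · have := ih (s + 1) q h1
        omega

theorem pairwise_posList (d : List Int) : ∀ (s : Int), List.Pairwise (· < ·) (posList d s) := by
  
  induction d with
  | nil => intro s; simp [posList]
  | cons a t ih =>
    intro s
    by_cases ha : a = 0
    · rw [posList, if_pos ha]; exact ih (s + 1)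
    · rw [posList, if_neg ha]
      refine List.pairwise_cons.mpr ⟨?_, ih (s + 1)⟩
      intro q hq
      have := mem_posList t (s + 1) q hq
      omega

theorem posList_all_zero (d : List Int) : ∀ (s : Int), (∀ x ∈ d, x = 0) → posList d s = [] := by
  
  induction d with
  | nil => intro s _; rfl
  | cons a t ih =>
    intro s h
    rw [posList, if_pos (h a (by simp))]
    exact ih (s + 1) (fun y hy => h y (by simp [hy]))

-- B's position list is A's filter over the range
theorem filter_range_eq_posList (c d : List Int) :
    ∀ (s : Int), (∀ k : Nat, k < d.length → PySem.List.pyGetD c (s + (k : Int)) 0 = d.getD k 0) →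
    (PySem.List.pyRange s (s + d.length) 1).filter (fun i => PySem.List.pyGetD c i 0 != 0) = posList d s := by
  
  induction d with
  | nil =>
    intro s _
    rw [show s + (([] : List Int).length : Int) = s by simp,
      PySem.List.pyRange_one_eq_nil le_rfl]
    rfl
  | cons a t ih =>
    intro s h
    have hlen : s + (((a :: t).length : Nat) : Int) = (s + 1) + (t.length : Int) := by
      simp only [List.length_cons, Nat.cast_add, Nat.cast_one]; ring
    have hlt : s < s + (((a :: t).length : Nat) : Int) := by
      simp only [List.length_cons, Nat.cast_add, Nat.cast_one]; omega
    have ha : PySem.List.pyGetD c s 0 = a := by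
      have := h 0 (by simp)
      simpa using this
    rw [hlen, PySem.List.pyRange_one_cons (by omega), List.filter_cons]
    have htail : (PySem.List.pyRange (s + 1) (s + 1 + (t.length : Int)) 1).filter
        (fun i => PySem.List.pyGetD c i 0 != 0) = posList t (s + 1) := by
      apply ih (s + 1)
      intro k hk
      have := h (k + 1) (by simpa using Nat.succ_lt_succ hk)
      rw [show s + ((k : Nat) + 1 : Nat) = s + 1 + (k : Int) by push_cast; ring] at this
      simpa using this
    by_cases haz : a = 0
    · rw [posList, if_pos haz]
      simp only [ha, haz, bne_self_eq_false, Bool.false_eq_true, if_false]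
      exact htail
    · rw [posList, if_neg haz]
      simp only [ha, bne_iff_ne, ne_eq, haz, not_false_eq_true, if_true]
      rw [htail]

theorem sum_posList (c d : List Int) :
    ∀ (s : Int), (∀ k : Nat, k < d.length → PySem.List.pyGetD c (s + (k : Int)) 0 = d.getD k 0) →
    ((posList d s).map (fun i => PySem.List.pyGetD c i 0)).sum = d.sum := by
  
  induction d with
  | nil => intro s _; rfl
  | cons a t ih =>
    intro s h
    have ha : PySem.List.pyGetD c s 0 = a := by
      have := h 0 (by simp)
      simpa using this
    have htail : ((posList t (s + 1)).map (fun i => PySem.List.pyGetD c i 0)).sum = t.sum := by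
      apply ih (s + 1)
      intro k hk
      have := h (k + 1) (by simpa using Nat.succ_lt_succ hk)
      rw [show s + ((k : Nat) + 1 : Nat) = s + 1 + (k : Int) by push_cast; ring] at this
      simpa using this
    by_cases haz : a = 0
    · rw [posList, if_pos haz, htail]
      simp [haz]
    · rw [posList, if_neg haz]
      simp only [List.map_cons, List.sum_cons, ha, htail, List.sum_cons]

theorem foldB_eq (n : Int) (hn : 0 < n) (P : List Int) : ∀ (r prev : Int),
    (P.foldl (fun (st : Int × Int) p =>
      (st.1 + PySem.Int.floordiv (PySem.Int.mod (p - st.2 - 1) n + 1) 2, p)) (r, prev)).1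
    = r + Gn n prev P := by
  
  induction P with
  | nil => intro r prev; simp [Gn]
  | cons p t ih =>
    intro r prev
    simp only [List.foldl_cons]
    rw [ih]
    simp only [Gn]
    rw [PySem.Int.floordiv_eq_ediv_of_pos (by norm_num),
      PySem.Int.mod_eq_emod_of_pos hn]
    show r + ((p - prev - 1) % n + 1) / 2 + Gn n p t
      = r + (ch ((p - prev - 1) % n) + Gn n p t)
    unfold ch
    ring

theorem getLastD_append_cons (X : List Int) : ∀ (q : Int) (Y : List Int) (dflt : Int),
    (X ++ q :: Y).getLastD dflt = Y.getLastD q := by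
  
  induction X with
  | nil => intro q Y dflt; simp only [List.nil_append, List.getLastD_cons]
  | cons a t ih =>
    intro q Y dflt
    rw [List.cons_append, List.getLastD_cons]
    exact ih q Y a

theorem getLastD_irrel (X : List Int) (h : X ≠ []) (d1 d2 : Int) :
    X.getLastD d1 = X.getLastD d2 := by
  cases X with
  | nil => exact absurd rfl h
  | cons a t => rw [List.getLastD_cons, List.getLastD_cons]

theorem getLast_eq_getLastD (X : List Int) (h : X ≠ []) (dflt : Int) :
    X.getLast h = X.getLastD dflt := by
  induction X with
  | nil => exact absurd rfl h
  | cons a t ih =>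
    cases t with
    | nil => simp [List.getLast, List.getLastD]
    | cons b t2 =>
      rw [List.getLastD_cons, List.getLast_cons (by simp)]
      exact ih (by simp) 

theorem getLastD_map_add (X : List Int) : ∀ (s d1 d2 : Int), X ≠ [] →
    (X.map (· + s)).getLastD d1 = X.getLastD d2 + s := by
  induction X with
  | nil => intro s d1 d2 h; exact absurd rfl h
  | cons a t ih =>
    intro s d1 d2 _
    cases t with
    | nil => simp
    | cons b t2 =>
      have h2 := ih s (a + s) a (by simp)
      simpa using h2

-- the rotation lemma: circular gap sums agree between d = u ++ b :: v and its rotation v ++ u ++ [b]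
theorem hlb₀ (u v : List Int) (hB : posList v 0 ≠ []) :
    ((posList v 0).map (· + ((u.length : Int) + 1))).getLastD (u.length : Int)
      = (posList v 0).getLastD 0 + ((u.length : Int) + 1) :=
  getLastD_map_add (posList v 0) ((u.length : Int) + 1) (u.length : Int) 0 hB

theorem rot_gs (u v : List Int) (b : Int) (hb : b ≠ 0) (n : Int)
    (hn : n = (u.length : Int) + v.length + 1) :
    Gn n ((posList (u ++ b :: v) 0).getLastD 0) (posList (u ++ b :: v) 0)
      = Gn n (n - 1) (posList (v ++ u) 0 ++ [n - 1]) := by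
  have hPd : posList (u ++ b :: v) 0
      = posList u 0 ++ (u.length : Int) :: (posList v 0).map (· + ((u.length : Int) + 1)) := by
    rw [posList_append u (b :: v) 0, zero_add]
    congr 1
    rw [posList, if_neg hb]
    rw [posList_map v ((u.length : Int) + 1)]
  have hPe : posList (v ++ u) 0 = posList v 0 ++ (posList u 0).map (· + (v.length : Int)) := by
    rw [posList_append v u 0, zero_add, posList_map u (v.length : Int)]
  rw [hPd, hPe, getLastD_append_cons, List.append_assoc, Gn_append, Gn_append, Gn_append]
  simp only [Gn, add_zero]
  have e1 : Gn n (u.length : Int) ((posList v 0).map (· + ((u.length : Int) + 1)))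
      = Gn n (-1) (posList v 0) := by
    have h := Gn_shift n ((u.length : Int) + 1) (posList v 0) (-1)
    rw [show (-1 : Int) + ((u.length : Int) + 1) = (u.length : Int) by ring] at h
    exact h
  have e2 : Gn n (n - 1) (posList v 0) = Gn n (-1) (posList v 0) := by
    have h := Gn_prev_add n (posList v 0) (-1)
    rw [show (-1 : Int) + n = n - 1 by ring] at h
    exact h
  rw [e1, e2]
  by_cases hB : posList v 0 = []
  · rw [hB]
    simp only [List.map_nil, List.getLastD_nil, Gn, add_zero, zero_add]
    have e3 : Gn n (n - 1) ((posList u 0).map (· + (v.length : Int)))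
        = Gn n (u.length : Int) (posList u 0) := by
      have h := Gn_shift n (v.length : Int) (posList u 0) ((u.length : Int))
      rw [show (u.length : Int) + (v.length : Int) = n - 1 by omega] at h
      exact h
    rw [e3]
    by_cases hA : posList u 0 = []
    · rw [hA]
      simp only [List.map_nil, List.getLastD_nil, Gn, add_zero, zero_add]
      rw [show (u.length : Int) - (u.length : Int) - 1 = -1 by ring,
        show n - 1 - (n - 1) - 1 = -1 by ring]
    · rw [getLastD_map_add (posList u 0) (v.length : Int) (n - 1) 0 hA,
        getLastD_irrel (posList u 0) hA (u.length : Int) 0,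
        show n - 1 - ((posList u 0).getLastD 0 + (v.length : Int)) - 1
          = (u.length : Int) - (posList u 0).getLastD 0 - 1 by omega]
  · rw [hlb₀ u v hB, getLastD_irrel (posList v 0) hB (n - 1) 0]
    have e4 : Gn n ((posList v 0).getLastD 0) ((posList u 0).map (· + (v.length : Int)))
        = Gn n ((posList v 0).getLastD 0 - (v.length : Int)) (posList u 0) := by
      have h := Gn_shift n (v.length : Int) (posList u 0)
        ((posList v 0).getLastD 0 - (v.length : Int))
      rw [show (posList v 0).getLastD 0 - (v.length : Int) + (v.length : Int)
        = (posList v 0).getLastD 0 by ring] at h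
      exact h
    have e5 : Gn n ((posList v 0).getLastD 0 + ((u.length : Int) + 1)) (posList u 0)
        = Gn n ((posList v 0).getLastD 0 - (v.length : Int)) (posList u 0) := by
      have h := Gn_prev_add n (posList u 0) ((posList v 0).getLastD 0 - (v.length : Int))
      rw [show (posList v 0).getLastD 0 - (v.length : Int) + n
        = (posList v 0).getLastD 0 + ((u.length : Int) + 1) by omega] at h
      exact h
    rw [e4, e5]
    by_cases hA : posList u 0 = []
    · rw [hA]
      simp only [List.map_nil, List.getLastD_nil, Gn, add_zero, zero_add]
      rw [show n - 1 - (posList v 0).getLastD 0 - 1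
          = ((u.length : Int) - ((posList v 0).getLastD 0 + ((u.length : Int) + 1)) - 1) + n
          by omega,
        Int.add_emod_right]
      ring
    · rw [getLastD_irrel (posList u 0) hA
          ((posList v 0).getLastD 0 + ((u.length : Int) + 1)) 0,
        getLastD_map_add (posList u 0) (v.length : Int) ((posList v 0).getLastD 0) 0 hA,
        show n - 1 - ((posList u 0).getLastD 0 + (v.length : Int)) - 1
          = (u.length : Int) - (posList u 0).getLastD 0 - 1 by omega]
      ring

theorem findStart_pos (c : List Int) : ∀ (l : List Int),
    (∃ i ∈ l, PySem.List.pyGetD c i 0 > 0) →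
    findStart c l ∈ l ∧ PySem.List.pyGetD c (findStart c l) 0 > 0 := by
  
  intro l
  induction l with
  | nil => intro h; simp at h
  | cons i t ih =>
    intro h
    by_cases hp : PySem.List.pyGetD c i 0 > 0
    · rw [findStart, if_pos hp]
      exact ⟨by simp, hp⟩
    · rw [findStart, if_neg hp]
      have hex : ∃ j ∈ t, PySem.List.pyGetD c j 0 > 0 := by
        obtain ⟨j, hj, hjp⟩ := h
        rcases List.mem_cons.mp hj with h1 | h1
        · exact absurd (h1 ▸ hjp) hp
        · exact ⟨j, h1, hjp⟩
      obtain ⟨h1, h2⟩ := ih hex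
      exact ⟨by simp [h1], h2⟩

theorem findStart_zero (c : List Int) : ∀ (l : List Int),
    (∀ i ∈ l, ¬ PySem.List.pyGetD c i 0 > 0) → findStart c l = 0 := by
  
  intro l
  induction l with
  | nil => intro _; rfl
  | cons i t ih =>
    intro h
    rw [findStart, if_neg (h i (by simp))]
    exact ih (fun j hj => h j (by simp [hj]))

theorem pyGetD_take (c : List Int) (m : Nat) (i : Int) (h0 : 0 ≤ i) (h1 : i < (m : Int))
    (h2 : m ≤ c.length) : PySem.List.pyGetD c i 0 = PySem.List.pyGetD (c.take m) i 0 := by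
  have hm : ((c.take m).length : Int) = (m : Int) := by
    simp only [List.length_take]
    omega
  rw [PySem.List.pyGetD_eq_getElem c 0 h0 (by omega : i < (c.length : Int)),
    PySem.List.pyGetD_eq_getElem (c.take m) 0 h0 (by rw [hm]; exact h1)]
  rw [List.getElem_take]

theorem take_succ_getD (d : List Int) : ∀ (j : Nat), j < d.length →
    d.take (j + 1) = d.take j ++ [d.getD j 0] := by
  
  induction d with
  | nil => intro j h; simp at h
  | cons a t ih =>
    intro j h
    cases j with
    | zero => simp
    | succ m =>
      simp only [List.take_succ_cons, List.getD_cons_succ, List.cons_append]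
      rw [ih m (by simpa using h)]

theorem getD_take' : ∀ (c : List Int) (N k : Nat), k < N → (c.take N).getD k 0 = c.getD k 0 := by
  intro c
  induction c with
  | nil => intro N k _; simp
  | cons a t ih =>
    intro N k h
    cases N with
    | zero => omega
    | succ M =>
      cases k with
      | zero => simp
      | succ m =>
        simp only [List.take_succ_cons, List.getD_cons_succ]
        exact ih M m (by omega)

-- B's port, normalised: position list, its value sum and the circular gap sum
theorem alt_eq (n : Int) (c : List Int) (hn1 : 1 ≤ n) (hn2 : n ≤ (c.length : Int))
    (hs : ¬ c.sum = 0) :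
    solve_alt n c = if posList (c.take n.toNat) 0 = [] then (c.take n.toNat).sum
      else (c.take n.toNat).sum
        + Gn n ((posList (c.take n.toNat) 0).getLastD 0) (posList (c.take n.toNat) 0) := by
  have hNc : n.toNat ≤ c.length := by omega
  have hdlen : (c.take n.toNat).length = n.toNat := by rw [List.length_take]; omega
  have hlink : ∀ k : Nat, k < (c.take n.toNat).length →
      PySem.List.pyGetD c ((0 : Int) + (k : Int)) 0 = (c.take n.toNat).getD k 0 := by
    intro k hk
    rw [zero_add]
    simp only [PySem.List.pyGetD_natCast]
    exact (getD_take' c n.toNat k (by omega)).symm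
  have hPmain : (PySem.List.pyRange 0 n 1).filter (fun i => PySem.List.pyGetD c i 0 != 0)
      = posList (c.take n.toNat) 0 := by
    rw [show PySem.List.pyRange 0 n 1
        = PySem.List.pyRange 0 ((0 : Int) + ((c.take n.toNat).length : Int)) 1 from by
      rw [hdlen]; congr 1; omega]
    exact filter_range_eq_posList c (c.take n.toNat) 0 hlink
  simp only [solve_alt, if_neg hs]
  rw [hPmain, sum_posList c (c.take n.toNat) 0 hlink]
  by_cases hP : posList (c.take n.toNat) 0 = []
  · rw [if_pos hP, if_pos hP]
  · rw [if_neg hP, if_neg hP,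
      PySem.List.pyGetD_neg_one (posList (c.take n.toNat) 0) 0 hP,
      getLast_eq_getLastD (posList (c.take n.toNat) 0) hP 0,
      foldB_eq n (by omega) (posList (c.take n.toNat) 0) (c.take n.toNat).sum
        ((posList (c.take n.toNat) 0).getLastD 0)]

-- A's port, normalised: its two range folds are one scan of the rotated cell list
theorem normA (n : Int) (c : List Int) (hn1 : 1 ≤ n) (hn2 : n ≤ (c.length : Int))
    (idx : Int) (h0 : 0 ≤ idx) (h1 : idx < n) :
    ((PySem.List.pyRange 0 (idx + 1) 1).foldl
        (fun (st : Int × Int) i =>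
          if PySem.List.pyGetD c i 0 = 0 then (st.1, st.2 + 1)
          else (st.1 + PySem.List.pyGetD c i 0 + pyCeilHalf st.2, 0))
        ((PySem.List.pyRange (idx + 1) n 1).foldl
          (fun (st : Int × Int) i =>
            if PySem.List.pyGetD c i 0 = 0 then (st.1, st.2 + 1)
            else (st.1 + PySem.List.pyGetD c i 0 + pyCeilHalf st.2, 0)) (0, 0))).1
      = lin ((c.take n.toNat).drop (idx + 1).toNat
          ++ (c.take n.toNat).take (idx + 1).toNat) 0 := by
  have hNc : n.toNat ≤ c.length := by omega
  have hdlen : (c.take n.toNat).length = n.toNat := by rw [List.length_take]; omega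
  have hdl : (((c.take n.toNat).length : Nat) : Int) = n := by omega
  set d := c.take n.toNat with hd_def
  set k := (idx + 1).toNat with hk_def
  have e1 : (PySem.List.pyRange (idx + 1) n 1).foldl
      (fun (st : Int × Int) i =>
        if PySem.List.pyGetD c i 0 = 0 then (st.1, st.2 + 1)
        else (st.1 + PySem.List.pyGetD c i 0 + pyCeilHalf st.2, 0)) (0, 0)
      = (d.drop k).foldl
        (fun (st : Int × Int) x =>
          if x = 0 then (st.1, st.2 + 1) else (st.1 + x + pyCeilHalf st.2, 0)) (0, 0) := by
    have step1 := PySem.List.foldl_congr_mem (PySem.List.pyRange (idx + 1) n 1)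
      (fun (st : Int × Int) i =>
        if PySem.List.pyGetD c i 0 = 0 then (st.1, st.2 + 1)
        else (st.1 + PySem.List.pyGetD c i 0 + pyCeilHalf st.2, 0))
      (fun (st : Int × Int) i =>
        if PySem.List.pyGetD d i 0 = 0 then (st.1, st.2 + 1)
        else (st.1 + PySem.List.pyGetD d i 0 + pyCeilHalf st.2, 0))
      ((0, 0) : Int × Int) ?_
    · rw [step1, show n = ((d.length : Nat) : Int) from hdl.symm]
      exact PySem.List.foldl_pyRange_pyGetD' d 0
        (fun (st : Int × Int) x =>
          if x = 0 then (st.1, st.2 + 1) else (st.1 + x + pyCeilHalf st.2, 0)) (0, 0) (by omega)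
    · intro acc x hx
      have hx' := PySem.List.mem_pyRange_one.mp hx
      dsimp only
      rw [pyGetD_take c n.toNat x (by omega) (by omega) hNc]
  have e2 : ∀ S : Int × Int, (PySem.List.pyRange 0 (idx + 1) 1).foldl
      (fun (st : Int × Int) i =>
        if PySem.List.pyGetD c i 0 = 0 then (st.1, st.2 + 1)
        else (st.1 + PySem.List.pyGetD c i 0 + pyCeilHalf st.2, 0)) S
      = (d.take k).foldl
        (fun (st : Int × Int) x =>
          if x = 0 then (st.1, st.2 + 1) else (st.1 + x + pyCeilHalf st.2, 0)) S := by
    intro S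
    have htk2 : d.take k = c.take k := by
      rw [hd_def, List.take_take]
      congr 1
      omega
    have step1 := PySem.List.foldl_congr_mem (PySem.List.pyRange 0 (idx + 1) 1)
      (fun (st : Int × Int) i =>
        if PySem.List.pyGetD c i 0 = 0 then (st.1, st.2 + 1)
        else (st.1 + PySem.List.pyGetD c i 0 + pyCeilHalf st.2, 0))
      (fun (st : Int × Int) i =>
        if PySem.List.pyGetD (d.take k) i 0 = 0 then (st.1, st.2 + 1)
        else (st.1 + PySem.List.pyGetD (d.take k) i 0 + pyCeilHalf st.2, 0)) S ?_
    · rw [step1, show (idx + 1 : Int) = (((d.take k).length : Nat) : Int) by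
        rw [List.length_take]; omega]
      exact PySem.List.foldl_pyRange_zero_pyGetD' (d.take k) 0
        (fun (st : Int × Int) x =>
          if x = 0 then (st.1, st.2 + 1) else (st.1 + x + pyCeilHalf st.2, 0)) S
    · intro acc x hx
      have hx' := PySem.List.mem_pyRange_one.mp hx
      dsimp only
      rw [pyGetD_take c k x hx'.1 (by omega) (by omega), htk2]
  rw [e1, e2, ← List.foldl_append, foldA_eq, zero_add]

-- the anchored main case: some cell with nonzero count at index idx < n
theorem anchored (n : Int) (c : List Int) (hn1 : 1 ≤ n) (hn2 : n ≤ (c.length : Int))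
    (hs : ¬ c.sum = 0) (idx : Int) (h0 : 0 ≤ idx) (h1 : idx < n)
    (hanch : (c.take n.toNat).getD idx.toNat 0 ≠ 0) :
    ((PySem.List.pyRange 0 (idx + 1) 1).foldl
        (fun (st : Int × Int) i =>
          if PySem.List.pyGetD c i 0 = 0 then (st.1, st.2 + 1)
          else (st.1 + PySem.List.pyGetD c i 0 + pyCeilHalf st.2, 0))
        ((PySem.List.pyRange (idx + 1) n 1).foldl
          (fun (st : Int × Int) i =>
            if PySem.List.pyGetD c i 0 = 0 then (st.1, st.2 + 1)
            else (st.1 + PySem.List.pyGetD c i 0 + pyCeilHalf st.2, 0)) (0, 0))).1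
      = solve_alt n c := by
  have hNc : n.toNat ≤ c.length := by omega
  have hdlen : (c.take n.toNat).length = n.toNat := by rw [List.length_take]; omega
  rw [normA n c hn1 hn2 idx h0 h1]
  set d := c.take n.toNat with hd_def
  set k := (idx + 1).toNat with hk_def
  have hkd : k ≤ d.length := by omega
  have hidxd : idx.toNat < d.length := by omega
  have htk : d.take k = d.take idx.toNat ++ [d.getD idx.toNat 0] := by
    rw [show k = idx.toNat + 1 by omega]
    exact take_succ_getD d idx.toNat hidxd
  have hd : d = d.take idx.toNat ++ d.getD idx.toNat 0 :: d.drop k := by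
    conv_lhs => rw [← List.take_append_drop k d]
    rw [htk, List.append_assoc, List.singleton_append]
  have hlen := congrArg List.length hd
  simp only [List.length_append, List.length_cons] at hlen
  have hvu : ((d.drop k ++ d.take idx.toNat).length : Int) = n - 1 := by
    rw [List.length_append]
    omega
  rw [htk, ← List.append_assoc,
    lin_core (d.drop k ++ d.take idx.toNat) (d.getD idx.toNat 0) 0 0 hanch le_rfl,
    show (0 : Int) - 0 - 1 = -1 by ring, zero_add, hvu]
  have hpair : List.Pairwise (· < ·)
      (posList (d.drop k ++ d.take idx.toNat) 0 ++ [n - 1]) := by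
    rw [List.pairwise_append]
    refine ⟨pairwise_posList _ 0, List.pairwise_singleton _ _, ?_⟩
    intro q hq r hr
    have hm := mem_posList _ 0 q hq
    simp only [List.mem_singleton] at hr
    omega
  have hbnd : ∀ q ∈ posList (d.drop k ++ d.take idx.toNat) 0 ++ [n - 1], 0 ≤ q ∧ q < n := by
    intro q hq
    rcases List.mem_append.mp hq with h | h
    · have hm := mem_posList _ 0 q h
      omega
    · simp only [List.mem_singleton] at h
      omega
  rw [← Gn_wrap n (by omega) _ hpair hbnd]
  rw [← rot_gs (d.take idx.toNat) (d.drop k) (d.getD idx.toNat 0) hanch n (by omega)]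
  rw [← hd]
  have hsum : (d.drop k ++ d.take idx.toNat).sum + d.getD idx.toNat 0 = d.sum := by
    conv_rhs => rw [hd]
    simp only [List.sum_append, List.sum_cons]
    ring
  rw [hsum]
  have hPne : posList d 0 ≠ [] := by
    conv_lhs => rw [hd]
    rw [posList_append, zero_add, posList]
    rw [if_neg hanch]
    simp
  rw [alt_eq n c hn1 hn2 hs, if_neg hPne]

-- ===== VERDICT (by name: the statement is the Claim_ definition above) =====
theorem solve_spec : Claim_equal_solve := by
  intro n c _hdom hpre
  obtain ⟨hpre, hnd⟩ := hpre
  show solve n c = solve_alt n c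
  by_cases hs : c.sum = 0
  · simp only [solve, solve_alt, if_pos hs]
  · rcases hpre with hs0 | ⟨hn2', hrest⟩
    · exact absurd hs0 hs
    have hn2 : n ≤ (c.length : Int) := hn2'
    by_cases hn1 : 1 ≤ n
    swap
    · -- n ≤ 0: both scans see no cells; A's second loop only reads c[0] = 0
      have hc0 : c.getD 0 0 = 0 := by
        rcases hrest with h | h
        · omega
        · exact h
      have hr1 : PySem.List.pyRange 0 n 1 = [] := PySem.List.pyRange_one_eq_nil (by omega)
      have hr2 : PySem.List.pyRange (0 + 1) n 1 = [] := PySem.List.pyRange_one_eq_nil (by omega)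
      have hr3 : PySem.List.pyRange 0 1 1 = [0] := by
        have h := PySem.List.pyRange_one_singleton (0 : Int)
        simpa using h
      have hr4 : PySem.List.pyRange 1 n 1 = [] := PySem.List.pyRange_one_eq_nil (by omega)
      cases c with
      | nil => simp at hs
      | cons a t =>
        have ha : a = 0 := by simpa using hc0
        simp [solve, solve_alt, if_neg hs, hr1, hr2, hr3, hr4, findStart,
          PySem.List.pyGetD_zero, ha]
    simp only [solve, if_neg hs]
    by_cases hex : ∃ i ∈ PySem.List.pyRange 0 n 1, PySem.List.pyGetD c i 0 > 0
    · obtain ⟨hmem, hpos⟩ := findStart_pos c (PySem.List.pyRange 0 n 1) hex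
      have hx' := PySem.List.mem_pyRange_one.mp hmem
      have hanch : (c.take n.toNat).getD (findStart c (PySem.List.pyRange 0 n 1)).toNat 0 ≠ 0 := by
        rw [pyGetD_take c n.toNat (findStart c (PySem.List.pyRange 0 n 1))
          (by omega) (by omega) (by omega)] at hpos
        rw [PySem.List.pyGetD_eq_getElem _ 0 (by omega)
          (by rw [List.length_take]; push_cast; omega)] at hpos
        rw [List.getD_eq_getElem _ 0 (by rw [List.length_take]; omega)]
        omega
      exact anchored n c hn1 hn2 hs (findStart c (PySem.List.pyRange 0 n 1))
        hx'.1 hx'.2 hanch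
    · have hfz : findStart c (PySem.List.pyRange 0 n 1) = 0 :=
        findStart_zero c _ (fun i hi hp => hex ⟨i, hi, hp⟩)
      rw [hfz]
      by_cases hnz : ∃ x ∈ c.take n.toNat, x ≠ 0
      · have hall : ∀ x ∈ c.take n.toNat, x ≤ 0 := by
          intro x hx
          obtain ⟨j, hj, hjx⟩ := List.mem_iff_getElem.mp hx
          have hjl : j < n.toNat := by
            have h2 := hj
            rw [List.length_take] at h2
            omega
          have hnp : ¬ PySem.List.pyGetD c ((j : Nat) : Int) 0 > 0 := by
            refine fun hp => hex ⟨(j : Int), ?_, hp⟩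
            exact PySem.List.mem_pyRange_one.mpr ⟨by omega, by omega⟩
          rw [PySem.List.pyGetD_natCast] at hnp
          rw [← getD_take' c n.toNat j hjl] at hnp
          rw [List.getD_eq_getElem _ 0 hj, hjx] at hnp
          omega
        have hc0 : ¬ c.getD 0 0 = 0 := by
          intro hc0
          exact hnd ⟨hs, hall, hnz, hc0⟩
        have hanch : (c.take n.toNat).getD ((0 : Int)).toNat 0 ≠ 0 := by
          rw [Int.toNat_zero, getD_take' c n.toNat 0 (by omega)]
          exact hc0
        exact anchored n c hn1 hn2 hs 0 le_rfl (by omega) hanch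
      · have hz : ∀ x ∈ c.take n.toNat, x = 0 := by
          intro x hx
          by_contra hne
          exact hnz ⟨x, hx, hne⟩
        rw [normA n c hn1 hn2 0 le_rfl (by omega)]
        rw [lin_zero _ 0 (fun x hx => by
          rcases List.mem_append.mp hx with h | h
          · exact hz x (List.drop_subset _ _ h)
          · exact hz x (List.take_subset _ _ h))]
        rw [alt_eq n c hn1 hn2 hs, if_pos (posList_all_zero _ 0 hz),
          List.sum_eq_zero hz]
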